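-- pv_equiv track=rewrite | github.com/Jeeyeonn/Algorithm | 프로그래머스/거리두기_220923.py | bfs
-- ===== SOURCE A (Python) =====
-- from collections import deque
--
-- def bfs(i):
--     p_point = []
--
--     dx = [0, 0, 1, -1]
--     dy = [1, -1, 0, 0]
--
--     for a in range(5):
--         for b in range(5):
--             if i[a][b] == 'P':
--                 p_point.append([a, b, 0])
--
--
--     for c in p_point:
--         q = deque([c])
--         is_visited = [[False]*5 for _ in range(5)]
--
--         while q:
--             p = q.popleft()
--             x, y, d = p[0], p[1], p[2]
--             is_visited[x][y] = True
--
--             if 0 < d and i[x][y] == 'P':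
--                 return 0
--
--             if d == 1 or d == 0:
--
--                 for j in range(4):
--                     nx = x + dx[j]
--                     ny = y + dy[j]
--                     nd = d + 1
--
--                     if 0 <= nx < 5 and 0 <= ny < 5:
--                         if is_visited[nx][ny] != True:
--                             if i[nx][ny] != 'X':
--                                 is_visited[nx][ny] = True
--                                 q.append([nx, ny, nd])
--                             elif i[nx][ny] == 'P':
--                                 return 0
--
--     return 1
-- ===== SOURCE B (Python) =====
-- def bfs(i):
--     ps = []
--     for a in range(5):
--         for b in range(5):
--             if i[a][b] == 'P':
--                 ps.append((a, b))
--     for k in range(len(ps)):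
--         x, y = ps[k]
--         for u, v in ps[k + 1:]:
--             dist = abs(x - u) + abs(y - v)
--             if dist == 1:
--                 return 0
--             if dist == 2:
--                 if x == u:
--                     if i[x][(y + v) // 2] != 'X':
--                         return 0
--                 elif y == v:
--                     if i[(x + u) // 2][y] != 'X':
--                         return 0
--                 elif i[x][v] != 'X' or i[u][y] != 'X':
--                     return 0
--     return 1
-- ===== Notes on version B (the rewrite author's own statement) =====
-- stated objective: simpler
-- what changed: Replaces A's per-'P' breadth-first search (deque, 5x5 visited matrix, depth-limited expansion) by one scan collecting the 'P' coordinates and a pairwise Manhattan-distance check that tests the explicit intermediate cells (midpoint for straight distance-2 pairs, the two corners for diagonal pairs).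
import Mathlib
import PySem

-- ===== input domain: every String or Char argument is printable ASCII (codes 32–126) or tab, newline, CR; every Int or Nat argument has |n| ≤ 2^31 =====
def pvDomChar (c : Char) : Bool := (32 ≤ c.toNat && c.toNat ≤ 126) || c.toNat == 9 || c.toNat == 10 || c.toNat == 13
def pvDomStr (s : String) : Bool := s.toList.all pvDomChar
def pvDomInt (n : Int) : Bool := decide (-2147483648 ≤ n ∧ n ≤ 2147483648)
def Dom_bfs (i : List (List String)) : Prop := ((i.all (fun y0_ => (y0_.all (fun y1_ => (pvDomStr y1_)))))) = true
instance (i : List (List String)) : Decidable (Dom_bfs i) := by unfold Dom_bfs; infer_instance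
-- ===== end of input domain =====

-- B replaces A's per-'P' breadth-first search (deque + visited matrix) by one scan collecting the
-- 'P' coordinates and a pairwise Manhattan-distance check with explicit intermediate-cell tests
-- (objective: simpler). No argument is mutated by either program.

-- ===== PORT A =====

-- i[a][b] (used by both ports); exact under Pre_bfs: every access has 0 ≤ a, b < 5 in a ≥5×5 grid
def sub (i : List (List String)) (a b : Int) : String :=
  PySem.List.pyGetD (PySem.List.pyGetD i a []) b ""

def dxA : List Int := [0, 0, 1, -1]
def dyA : List Int := [1, -1, 0, 0]

-- [[False]*5 for _ in range(5)]
def visInit : List (List Bool) := (PySem.List.pyRange 0 5 1).map (fun _ => List.replicate 5 false)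

-- is_visited[x][y] (read); exact for the in-range indices A uses
def getv (vis : List (List Bool)) (x y : Int) : Bool :=
  PySem.List.pyGetD (PySem.List.pyGetD vis x []) y false

-- is_visited[x][y] = True; exact for the in-range indices A uses
def setv (vis : List (List Bool)) (x y : Int) : List (List Bool) :=
  PySem.List.pySetD vis x (PySem.List.pySetD (PySem.List.pyGetD vis x []) y true)

-- the 'for j in range(4)' neighbour loop of A, state = (queue, visited, returned-0 flag)
def expandA (i : List (List String)) (x y d : Int)
    (q : List (Int × Int × Int)) (vis : List (List Bool)) :
    List (Int × Int × Int) × List (List Bool) × Bool :=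
  (PySem.List.pyRange 0 4 1).foldl (fun st j =>
    let nx := x + PySem.List.pyGetD dxA j 0
    let ny := y + PySem.List.pyGetD dyA j 0
    let nd := d + 1
    if 0 ≤ nx ∧ nx < 5 ∧ 0 ≤ ny ∧ ny < 5 then
      if getv st.2.1 nx ny ≠ true then
        if sub i nx ny ≠ "X" then (st.1 ++ [(nx, ny, nd)], setv st.2.1 nx ny, st.2.2)
        else if sub i nx ny = "P" then (st.1, st.2.1, true)  -- Python's dead 'elif == P: return 0'
        else st
      else st
    else st) (q, vis, false)

-- the 'while q' loop; fuel-bounded recursion (at most 21 items are ever queued, see phiQ below)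
def stepA (i : List (List String)) : Nat → List (Int × Int × Int) → List (List Bool) → Bool
  | 0, _, _ => false
  | _ + 1, [], _ => false
  | fuel + 1, (x, y, d) :: rest, vis =>
    let vis1 := setv vis x y
    if 0 < d ∧ sub i x y = "P" then true
    else if d = 1 ∨ d = 0 then
      let st := expandA i x y d rest vis1
      if st.2.2 then true else stepA i fuel st.1 st.2.1
    else stepA i fuel rest vis1

def ppoints (i : List (List String)) : List (Int × Int × Int) :=
  (PySem.List.pyRange 0 5 1).foldl (fun acc a =>
    (PySem.List.pyRange 0 5 1).foldl (fun acc b =>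
      if sub i a b = "P" then acc ++ [(a, b, 0)] else acc) acc) []

def bfs (i : List (List String)) : Int :=
  if (ppoints i).any (fun c => stepA i 30 [c] visInit) then 0 else 1

-- ===== PORT B =====

def psB (i : List (List String)) : List (Int × Int) :=
  (PySem.List.pyRange 0 5 1).foldl (fun acc a =>
    (PySem.List.pyRange 0 5 1).foldl (fun acc b =>
      if sub i a b = "P" then acc ++ [(a, b)] else acc) acc) []

def nearB (i : List (List String)) (s t : Int × Int) : Bool :=
  let dist := |s.1 - t.1| + |s.2 - t.2|
  if dist = 1 then true
  else if dist = 2 then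
    if s.1 = t.1 then decide (sub i s.1 (PySem.Int.floordiv (s.2 + t.2) 2) ≠ "X")
    else if s.2 = t.2 then decide (sub i (PySem.Int.floordiv (s.1 + t.1) 2) s.2 ≠ "X")
    else decide (sub i s.1 t.2 ≠ "X") || decide (sub i t.1 s.2 ≠ "X")
  else false

-- 'for k: for (u,v) in ps[k+1:]' — each element against its suffix
def pairsB (i : List (List String)) : List (Int × Int) → Bool
  | [] => false
  | p :: rest => rest.any (fun t => nearB i p t) || pairsB i rest

def bfs_alt (i : List (List String)) : Int :=
  if pairsB i (psB i) then 0 else 1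

-- ===== PRECONDITION & SPEC =====

-- A indexes i[a][b] for all 0 ≤ a, b < 5 (IndexError otherwise): grids with at least 5 rows
-- whose first 5 rows each have at least 5 entries; B needs exactly the same accesses.
def Pre_bfs (i : List (List String)) : Prop := 5 ≤ i.length ∧ ∀ r ∈ i.take 5, 5 ≤ r.length
instance (i : List (List String)) : Decidable (Pre_bfs i) := by unfold Pre_bfs; infer_instance

def pvWitness_bfs : List (List String) :=
  [["P", "O", "X", "O", "P"], ["O", "X", "O", "X", "O"], ["O", "O", "O", "O", "O"],
   ["X", "X", "X", "X", "X"], ["O", "O", "O", "O", "P"]]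

def Spec_bfs (i : List (List String)) (out : Int) : Prop := out = bfs_alt i
instance (i : List (List String)) (out : Int) : Decidable (Spec_bfs i out) := by unfold Spec_bfs; infer_instance

-- ===== CLAIM (what is proved, stated in full; the proofs are below) =====
def Claim_equal_bfs : Prop := ∀ (i : List (List String)), Dom_bfs i → Pre_bfs i → Spec_bfs i (bfs i)

-- ===== LEMMAS AND PROOFS =====

-- positions, neighbourhood, cell classes (proof-only helpers)
abbrev inR (p : Int × Int) : Prop := 0 ≤ p.1 ∧ p.1 < 5 ∧ 0 ≤ p.2 ∧ p.2 < 5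
def nbrsL (p : Int × Int) : List (Int × Int) :=
  [(p.1, p.2 + 1), (p.1, p.2 - 1), (p.1 + 1, p.2), (p.1 - 1, p.2)]
abbrev isP (i : List (List String)) (p : Int × Int) : Prop := sub i p.1 p.2 = "P"
abbrev openC (i : List (List String)) (p : Int × Int) : Prop := sub i p.1 p.2 ≠ "X"
def N1 (i : List (List String)) (s : Int × Int) : List (Int × Int) :=
  (nbrsL s).filter (fun p => decide (inR p) && decide (openC i p))
def Conf (i : List (List String)) (s t : Int × Int) : Prop :=
  inR t ∧ isP i t ∧ t ≠ s ∧ (t ∈ N1 i s ∨ ∃ m ∈ N1 i s, t ∈ nbrsL m)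

-- what the BFS from s will still report from queue q
def GoalQ (i : List (List String)) (s : Int × Int) (q : List (Int × Int × Int)) : Prop :=
  ∃ it ∈ q, isP i (it.1, it.2.1) ∨
    (it.2.2 = 1 ∧ ∃ p ∈ nbrsL (it.1, it.2.1), inR p ∧ isP i p ∧ p ≠ s)

def wgt (d : Int) : Nat := if d = 1 then 5 else 1
def phiQ (q : List (Int × Int × Int)) : Nat := (q.map (fun it => wgt it.2.2)).sum
def Vshape (vis : List (List Bool)) : Prop := vis.length = 5 ∧ ∀ r ∈ vis, r.length = 5

abbrev condP (i : List (List String)) (vis : List (List Bool)) (p : Int × Int) : Prop :=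
  inR p ∧ getv vis p.1 p.2 = false ∧ openC i p
def pushL (i : List (List String)) (vis : List (List Bool)) (c : Int × Int) : List (Int × Int) :=
  (nbrsL c).filter (fun p => decide (condP i vis p))
def markAll (vis : List (List Bool)) (L : List (Int × Int)) : List (List Bool) :=
  L.foldl (fun v p => setv v p.1 p.2) vis

def InvQ (i : List (List String)) (s : Int × Int)
    (q : List (Int × Int × Int)) (vis : List (List Bool)) : Prop :=
  Vshape vis ∧ getv vis s.1 s.2 = true ∧
  (∀ it ∈ q, (it.2.2 = 1 ∧ (it.1, it.2.1) ∈ N1 i s) ∨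
             (it.2.2 = 2 ∧ inR (it.1, it.2.1) ∧ (it.1, it.2.1) ≠ s)) ∧
  (∀ p : Int × Int, inR p → getv vis p.1 p.2 = true → isP i p → p = s ∨ ∃ d, (p.1, p.2, d) ∈ q)

lemma shape_setv {vis : List (List Bool)} (h : Vshape vis) {x y : Int} (hxy : inR (x, y)) :
    Vshape (setv vis x y) := by
  obtain ⟨h1, h2⟩ := h
  obtain ⟨hx0_, hx5_, hy0_, hy5_⟩ := hxy
  have hx0 : 0 ≤ x := hx0_
  have hy0 : 0 ≤ y := hy0_
  have hx5 : x < 5 := hx5_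
  have hy5 : y < 5 := hy5_
  constructor
  · rw [setv, PySem.List.length_pySetD, h1]
  · intro r hr
    rw [setv, PySem.List.pySetD_of_nonneg _ _ hx0] at hr
    rcases List.mem_or_eq_of_mem_set hr with hmem | heq
    · exact h2 r hmem
    · subst heq
      rw [PySem.List.pySetD_of_nonneg _ _ hy0, List.length_set]
      exact h2 _ (PySem.List.pyGetD_mem vis [] ⟨by omega, by omega⟩)

lemma getv_setv {vis : List (List Bool)} (h : Vshape vis) {a b x y : Int}
    (hab : inR (a, b)) (hxy : inR (x, y)) :
    getv (setv vis a b) x y = if x = a ∧ y = b then true else getv vis x y := by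
  obtain ⟨h1, h2⟩ := h
  obtain ⟨ha0_, ha5_, hb0_, hb5_⟩ := hab
  obtain ⟨hx0_, hx5_, hy0_, hy5_⟩ := hxy
  have ha0 : 0 ≤ a := ha0_
  have hb0 : 0 ≤ b := hb0_
  have hx0 : 0 ≤ x := hx0_
  have hy0 : 0 ≤ y := hy0_
  have ha5 : a < 5 := ha5_
  have hb5 : b < 5 := hb5_
  have hx5 : x < 5 := hx5_
  have hy5 : y < 5 := hy5_
  have hrowmem : PySem.List.pyGetD vis a [] ∈ vis := PySem.List.pyGetD_mem vis [] ⟨by omega, by omega⟩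
  have hrowlen : (PySem.List.pyGetD vis a []).length = 5 := h2 _ hrowmem
  rw [setv, PySem.List.pySetD_of_nonneg _ _ ha0, PySem.List.pySetD_of_nonneg _ _ hb0]
  rw [getv, PySem.List.pyGetD_eq_getElem _ _ hx0 (by rw [List.length_set]; omega),
     List.getElem_set]
  by_cases hxa : x = a
  · subst hxa
    rw [if_pos (by omega),
       PySem.List.pyGetD_eq_getElem _ _ hy0 (by push_cast [List.length_set, hrowlen]; omega),
       List.getElem_set]
    by_cases hyb : y = b
    · subst hyb; rw [if_pos (by omega), if_pos ⟨rfl, rfl⟩]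
    · rw [if_neg (by omega), if_neg (by tauto), getv,
         PySem.List.pyGetD_eq_getElem _ _ hy0 (by omega)]
  · rw [if_neg (by omega), if_neg (by tauto), getv,
       PySem.List.pyGetD_eq_getElem (d := ([] : List Bool)) _ hx0 (by omega)]

lemma visInit_rows {r : List Bool} (hr : r ∈ visInit) : r = List.replicate 5 false := by
  rw [visInit, show PySem.List.pyRange 0 5 1 = [0,1,2,3,4] from by decide] at hr
  simp at hr
  exact hr

lemma shape_visInit : Vshape visInit := by
  refine ⟨by decide, fun r hr => by rw [visInit_rows hr]; rfl⟩

lemma pyGetD_false_of_all {l : List Bool} (h : ∀ b ∈ l, b = false) (y : Int) :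
    PySem.List.pyGetD l y false = false := by
  by_cases h2 : PySem.Raise.InRange l.length y
  · exact h _ (PySem.List.pyGetD_mem l false h2)
  · exact PySem.List.pyGetD_of_none _ _ _ ((PySem.List.pyGet?_eq_none_iff _ _).mpr h2)

lemma getv_visInit (x y : Int) : getv visInit x y = false := by
  rw [getv]
  have hrow : ∀ b ∈ PySem.List.pyGetD visInit x ([] : List Bool), b = false := by
    by_cases h : PySem.Raise.InRange visInit.length x
    · rw [visInit_rows (PySem.List.pyGetD_mem visInit [] h)]
      intro b hb; exact List.eq_of_mem_replicate hb
    · rw [PySem.List.pyGetD_of_none _ _ _ ((PySem.List.pyGet?_eq_none_iff _ _).mpr h)]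
      intro b hb; cases hb
  exact pyGetD_false_of_all hrow y

lemma mem_N1 {i : List (List String)} {s p : Int × Int} :
    p ∈ N1 i s ↔ p ∈ nbrsL s ∧ inR p ∧ openC i p := by
  simp [N1, List.mem_filter]

lemma nbr_ne {p c : Int × Int} (h : p ∈ nbrsL c) : p ≠ c := by
  simp [nbrsL] at h
  rcases h with h | h | h | h <;> (subst h; intro hc; rw [Prod.ext_iff] at hc; omega)

lemma nbr_symm {p c : Int × Int} (h : p ∈ nbrsL c) : c ∈ nbrsL p := by
  simp [nbrsL] at h ⊢
  rcases h with h | h | h | h <;> subst h <;> simp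



def Gb (i : List (List String)) (nd : Int)
    (st : List (Int × Int × Int) × List (List Bool) × Bool) (p : Int × Int) :
    List (Int × Int × Int) × List (List Bool) × Bool :=
  if 0 ≤ p.1 ∧ p.1 < 5 ∧ 0 ≤ p.2 ∧ p.2 < 5 then
    if getv st.2.1 p.1 p.2 ≠ true then
      if sub i p.1 p.2 ≠ "X" then (st.1 ++ [(p.1, p.2, nd)], setv st.2.1 p.1 p.2, st.2.2)
      else if sub i p.1 p.2 = "P" then (st.1, st.2.1, true)
      else st
    else st
  else st

lemma condP_setv_ne {i : List (List String)} {vis : List (List Bool)} (hsh : Vshape vis)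
    {c p : Int × Int} (hc : inR c) (hne : p ≠ c) :
    condP i (setv vis c.1 c.2) p ↔ condP i vis p := by
  by_cases hp : inR p
  · have hg := getv_setv hsh (a := c.1) (b := c.2) (x := p.1) (y := p.2) hc hp
    rw [if_neg (by intro h; exact hne (Prod.ext_iff.mpr ⟨h.1, h.2⟩))] at hg
    unfold condP
    rw [hg]
  · simp only [condP]
    tauto

lemma nbrs_pairwise (c : Int × Int) : (nbrsL c).Pairwise (· ≠ ·) := by
  simp only [ne_eq, Prod.ext_iff, not_and, nbrsL, List.pairwise_cons, List.mem_cons,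
    List.not_mem_nil, or_false, Prod.forall, and_imp, forall_eq_apply_imp_iff, not_true_eq_false,
    imp_false, forall_eq, IsEmpty.forall_iff, implies_true, List.Pairwise.nil, and_self, and_true]
  refine ⟨fun a b h h1 => by omega, fun a b h h1 => by omega, by omega⟩

lemma cellFold (i : List (List String)) (nd : Int) :
    ∀ (cells : List (Int × Int)) (q : List (Int × Int × Int)) (vis : List (List Bool)),
      Vshape vis → cells.Pairwise (· ≠ ·) →
      cells.foldl (Gb i nd) (q, vis, false) =
        (q ++ (cells.filter (fun p => decide (condP i vis p))).map (fun p => (p.1, p.2, nd)),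
         markAll vis (cells.filter (fun p => decide (condP i vis p))), false) := by
  intro cells
  induction cells with
  | nil => intro q vis _ _; simp [markAll]
  | cons c rest ih =>
    intro q vis hsh hpw
    obtain ⟨hpw1, hpw2⟩ := List.pairwise_cons.mp hpw
    by_cases hc : condP i vis c
    · obtain ⟨hcin, hcg, hco⟩ := hc
      have hG : Gb i nd (q, vis, false) c = (q ++ [(c.1, c.2, nd)], setv vis c.1 c.2, false) := by
        simp only [Gb]
        rw [if_pos hcin, if_pos (by simp [hcg]), if_pos hco]
      rw [List.foldl_cons, hG, ih _ _ (shape_setv hsh hcin) hpw2]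
      have hfil : rest.filter (fun p => decide (condP i (setv vis c.1 c.2) p)) =
          rest.filter (fun p => decide (condP i vis p)) := by
        apply List.filter_congr
        intro p hp
        simp only [decide_eq_decide]
        exact condP_setv_ne hsh hcin (Ne.symm (hpw1 p hp))
      rw [hfil, List.filter_cons_of_pos (by simp; exact ⟨hcin, hcg, hco⟩)]
      simp only [List.map_cons, markAll, List.foldl_cons, List.append_assoc, List.cons_append,
        List.nil_append]
    · have hG : Gb i nd (q, vis, false) c = (q, vis, false) := by
        simp only [Gb]
        by_cases h1 : (0 ≤ c.1 ∧ c.1 < 5 ∧ 0 ≤ c.2 ∧ c.2 < 5)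
        · rw [if_pos h1]
          by_cases h2 : getv vis c.1 c.2 = true
          · rw [if_neg (by simp [h2])]
          · have h3 : sub i c.1 c.2 = "X" := by
              by_contra h4
              exact hc ⟨h1, by simpa using h2, h4⟩
            rw [if_pos (by simp [h2]), if_neg (by simp [h3]), if_neg (by simp [h3])]
        · rw [if_neg h1]
      rw [List.foldl_cons, hG, ih _ _ hsh hpw2, List.filter_cons_of_neg (by simpa using hc)]

lemma expand_step (i : List (List String)) (x y d : Int) (q : List (Int × Int × Int))
    (vis : List (List Bool)) :
    expandA i x y d q vis = ([0, 1, 2, 3] : List Int).foldl (fun st j =>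
      Gb i (d + 1) st (x + PySem.List.pyGetD dxA j 0, y + PySem.List.pyGetD dyA j 0))
      (q, vis, false) := rfl

lemma expand_eq (i : List (List String)) (x y d : Int) (q : List (Int × Int × Int))
    (vis : List (List Bool)) (hsh : Vshape vis) :
    expandA i x y d q vis =
      (q ++ (pushL i vis (x, y)).map (fun p => (p.1, p.2, d + 1)),
       markAll vis (pushL i vis (x, y)), false) := by
  rw [expand_step]
  have h2 : ([0, 1, 2, 3] : List Int).foldl (fun st j =>
      Gb i (d + 1) st (x + PySem.List.pyGetD dxA j 0, y + PySem.List.pyGetD dyA j 0))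
      (q, vis, false) = (nbrsL (x, y)).foldl (Gb i (d + 1)) (q, vis, false) := by
    simp only [List.foldl_cons, List.foldl_nil, nbrsL]
    norm_num [show PySem.List.pyGetD dxA (0 : Int) (0 : Int) = 0 from by decide,
      show PySem.List.pyGetD dxA (1 : Int) (0 : Int) = 0 from by decide,
      show PySem.List.pyGetD dxA (2 : Int) (0 : Int) = 1 from by decide,
      show PySem.List.pyGetD dxA (3 : Int) (0 : Int) = -1 from by decide,
      show PySem.List.pyGetD dyA (0 : Int) (0 : Int) = 1 from by decide,
      show PySem.List.pyGetD dyA (1 : Int) (0 : Int) = -1 from by decide,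
      show PySem.List.pyGetD dyA (2 : Int) (0 : Int) = 0 from by decide,
      show PySem.List.pyGetD dyA (3 : Int) (0 : Int) = 0 from by decide, sub_eq_add_neg]
  rw [h2, cellFold i (d + 1) (nbrsL (x, y)) q vis hsh (nbrs_pairwise _), pushL]

lemma pushL_inR {i : List (List String)} {vis : List (List Bool)} {c p : Int × Int}
    (h : p ∈ pushL i vis c) : p ∈ nbrsL c ∧ inR p ∧ getv vis p.1 p.2 = false ∧ openC i p := by
  rw [pushL, List.mem_filter] at h
  refine ⟨h.1, ?_⟩
  have := of_decide_eq_true h.2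
  exact this

lemma shape_markAll : ∀ {L : List (Int × Int)} {vis : List (List Bool)},
    Vshape vis → (∀ p ∈ L, inR p) → Vshape (markAll vis L) := by
  intro L
  induction L with
  | nil => intro vis h _; exact h
  | cons c rest ih =>
    intro vis h hL
    show Vshape (markAll (setv vis c.1 c.2) rest)
    exact ih (shape_setv h (hL c (List.mem_cons_self))) (fun p hp => hL p (List.mem_cons_of_mem _ hp))

lemma getv_markAll : ∀ {L : List (Int × Int)} {vis : List (List Bool)},
    Vshape vis → (∀ p ∈ L, inR p) → ∀ {r : Int × Int}, inR r →
    (getv (markAll vis L) r.1 r.2 = true ↔ r ∈ L ∨ getv vis r.1 r.2 = true) := by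
  intro L
  induction L with
  | nil => intro vis _ _ r hr; simp [markAll]
  | cons c rest ih =>
    intro vis hsh hL r hr
    have hc := hL c (List.mem_cons_self)
    rw [show markAll vis (c :: rest) = markAll (setv vis c.1 c.2) rest from rfl,
      ih (shape_setv hsh hc) (fun p hp => hL p (List.mem_cons_of_mem _ hp)) hr,
      getv_setv hsh hc hr]
    split_ifs with hif
    · have : r = c := Prod.ext_iff.mpr ⟨hif.1, hif.2⟩
      subst this
      simp [List.mem_cons]
    · have hne : r ≠ c := by intro h; subst h; exact hif ⟨rfl, rfl⟩
      simp only [List.mem_cons]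
      tauto

lemma phiQ_cons (it : Int × Int × Int) (q : List (Int × Int × Int)) :
    phiQ (it :: q) = wgt it.2.2 + phiQ q := by
  simp [phiQ]

lemma phiQ_append2 (q : List (Int × Int × Int)) (L : List (Int × Int)) :
    phiQ (q ++ L.map (fun p => (p.1, p.2, (2 : Int)))) = phiQ q + L.length := by
  simp only [phiQ, List.map_append, List.sum_append, List.map_map]
  have : (List.map ((fun it => wgt it.2.2) ∘ fun p => (p.1, p.2, (2 : Int))) L) = List.map (fun _ => 1) L := by
    apply List.map_congr_left
    intro p _
    simp [wgt]
  rw [this]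
  simp [List.map_const']

lemma goalQ_cons {i : List (List String)} {s : Int × Int} {it : Int × Int × Int}
    {q : List (Int × Int × Int)} :
    GoalQ i s (it :: q) ↔
      (isP i (it.1, it.2.1) ∨ (it.2.2 = 1 ∧ ∃ p ∈ nbrsL (it.1, it.2.1), inR p ∧ isP i p ∧ p ≠ s))
        ∨ GoalQ i s q := by
  simp [GoalQ, List.mem_cons, or_and_right, exists_or]

lemma goalQ_append {i : List (List String)} {s : Int × Int} {q₁ q₂ : List (Int × Int × Int)} :
    GoalQ i s (q₁ ++ q₂) ↔ GoalQ i s q₁ ∨ GoalQ i s q₂ := by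
  simp [GoalQ, List.mem_append, or_and_right, exists_or]

lemma goalQ_map2 {i : List (List String)} {s : Int × Int} {L : List (Int × Int)} :
    GoalQ i s (L.map (fun p => (p.1, p.2, (2 : Int)))) ↔ ∃ p ∈ L, isP i p := by
  simp only [GoalQ, List.mem_map]
  constructor
  · rintro ⟨it, ⟨p, hp, rfl⟩, hhit⟩
    rcases hhit with h | h
    · exact ⟨p, hp, h⟩
    · exact absurd h.1 (by norm_num)
  · rintro ⟨p, hp, h⟩
    exact ⟨(p.1, p.2, 2), ⟨p, hp, rfl⟩, Or.inl h⟩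

lemma P_ne_X : ("P" : String) ≠ "X" := by decide

lemma notP_of (i : List (List String)) {p : Int × Int} {x y : Int}
    (hxy : p.1 = x ∧ p.2 = y) (hP : ¬sub i x y = "P") : ¬isP i p := by
  intro hc
  apply hP
  have hpe : p = (x, y) := Prod.ext_iff.mpr ⟨hxy.1, hxy.2⟩
  rw [hpe] at hc
  exact hc

lemma notP_of' (i : List (List String)) {p : Int × Int} {x y d c : Int}
    (h3 : (p.1, p.2, d) = (x, y, c)) (hP : ¬sub i x y = "P") : ¬isP i p :=
  notP_of i ⟨congrArg (fun t : Int × Int × Int => t.1) h3, congrArg (fun t : Int × Int × Int => t.2.1) h3⟩ hP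

lemma stepA_iff (i : List (List String)) (s : Int × Int) (hs : inR s) :
    ∀ (fuel : Nat) (q : List (Int × Int × Int)) (vis : List (List Bool)),
      InvQ i s q vis → phiQ q < fuel → (stepA i fuel q vis = true ↔ GoalQ i s q) := by
  intro fuel
  induction fuel with
  | zero => intro q vis _ h; exact absurd h (Nat.not_lt_zero _)
  | succ n ih =>
    rintro (_ | ⟨⟨x, y, d⟩, rest⟩) vis hInv hphi
    · simp [stepA, GoalQ]
    · obtain ⟨hsh, hviss, hI1, hI2⟩ := hInv
      have hhead := hI1 (x, y, d) List.mem_cons_self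
      rcases hhead with ⟨hd, hN1⟩ | ⟨hd, hinR, hne⟩
      · -- d = 1 : a distance-1 cell, in N1
        have hd' : d = 1 := hd
        subst hd'
        have hN1' := mem_N1.mp hN1
        have hxyin : inR (x, y) := hN1'.2.1
        have hshv : Vshape (setv vis x y) := shape_setv hsh hxyin
        have hgss : getv (setv vis x y) s.1 s.2 = true := by
          rw [getv_setv hsh hxyin hs]
          split_ifs with h
          · rfl
          · exact hviss
        by_cases hP : sub i x y = "P"
        · have hstep : stepA i (n + 1) ((x, y, 1) :: rest) vis = true := by
            simp only [stepA]
            rw [if_pos ⟨by norm_num, hP⟩]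
          rw [hstep, goalQ_cons]
          constructor
          · intro _
            exact Or.inl (Or.inl hP)
          · intro _
            rfl
        · set P2 := pushL i (setv vis x y) (x, y) with hP2
          set vis2 := markAll (setv vis x y) P2 with hvis2
          set q2 := rest ++ P2.map (fun p => (p.1, p.2, (2 : Int))) with hq2
          have hP2in : ∀ p ∈ P2, inR p := fun p hp => (pushL_inR hp).2.1
          have hP2s : ∀ p ∈ P2, p ≠ s := by
            intro p hp hps
            subst hps
            exact absurd hgss (by rw [(pushL_inR hp).2.2.1]; simp)
          have hstep : stepA i (n + 1) ((x, y, 1) :: rest) vis = stepA i n q2 vis2 := by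
            simp only [stepA]
            rw [if_neg (fun h => hP h.2), if_pos (Or.inl trivial),
              expand_eq i x y 1 rest (setv vis x y) hshv]
            norm_num [hq2, hvis2, hP2]
          have hInv2 : InvQ i s q2 vis2 := by
            refine ⟨shape_markAll hshv hP2in, ?_, ?_, ?_⟩
            · rw [hvis2, getv_markAll hshv hP2in hs]
              exact Or.inr hgss
            · intro it hit
              rcases List.mem_append.mp hit with h | h
              · exact hI1 it (List.mem_cons_of_mem _ h)
              · obtain ⟨p, hp, rfl⟩ := List.mem_map.mp h
                exact Or.inr ⟨rfl, hP2in p hp, hP2s p hp⟩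
            · intro p hpin hpv hpP
              rw [hvis2, getv_markAll hshv hP2in hpin] at hpv
              rcases hpv with h | h
              · exact Or.inr ⟨2, List.mem_append.mpr (Or.inr (List.mem_map.mpr ⟨p, h, rfl⟩))⟩
              · rw [getv_setv hsh hxyin hpin] at h
                split_ifs at h with hxy
                · exact absurd hpP (notP_of i hxy hP)
                · rcases hI2 p hpin h hpP with h2 | ⟨d, hd2⟩
                  · exact Or.inl h2
                  · rcases List.mem_cons.mp hd2 with h3 | h3
                    · exact absurd hpP (notP_of' i h3 hP)
                    · exact Or.inr ⟨d, List.mem_append.mpr (Or.inl h3)⟩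
          have hphi2 : phiQ q2 < n := by
            have h1 : phiQ ((x, y, 1) :: rest) = 5 + phiQ rest := by
              rw [phiQ_cons]; rfl
            have h2 : phiQ q2 = phiQ rest + P2.length := phiQ_append2 _ _
            have h3 : P2.length ≤ 4 := by
              have := List.length_filter_le (fun p => decide (condP i (setv vis x y) p)) (nbrsL (x, y))
              simpa [hP2, pushL, nbrsL] using this
            omega
          rw [hstep, ih q2 vis2 hInv2 hphi2, goalQ_cons]
          have hgq2 : GoalQ i s q2 ↔ GoalQ i s rest ∨ ∃ p ∈ P2, isP i p := by
            rw [hq2, goalQ_append, goalQ_map2]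
          rw [hgq2]
          simp only [hP, false_or]
          constructor
          · rintro (h | ⟨p, hp, hpP⟩)
            · exact Or.inr h
            · have h1 := pushL_inR hp
              exact Or.inl ⟨by norm_num, p, h1.1, h1.2.1, hpP, hP2s p hp⟩
          · rintro (⟨-, p, hpn, hpin, hpP, hps⟩ | h)
            · by_cases hv : getv (setv vis x y) p.1 p.2 = false
              · refine Or.inr ⟨p, ?_, hpP⟩
                rw [hP2, pushL, List.mem_filter]
                exact ⟨hpn, decide_eq_true ⟨hpin, hv, by intro hX; rw [hpP] at hX; exact P_ne_X hX⟩⟩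
              · have hv' : getv (setv vis x y) p.1 p.2 = true := by
                  cases h : getv (setv vis x y) p.1 p.2
                  · exact absurd h hv
                  · rfl
                rw [getv_setv hsh hxyin hpin] at hv'
                split_ifs at hv' with hxy
                · exact absurd hpP (notP_of i hxy hP)
                · rcases hI2 p hpin hv' hpP with h2 | ⟨d, hd2⟩
                  · exact absurd h2 hps
                  · rcases List.mem_cons.mp hd2 with h3 | h3
                    · exact absurd hpP (notP_of' i h3 hP)
                    · exact Or.inl ⟨(p.1, p.2, d), h3, Or.inl hpP⟩
            · exact Or.inl h
      · -- d = 2 : no further expansion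
        have hd' : d = 2 := hd
        subst hd'
        have hshv : Vshape (setv vis x y) := shape_setv hsh hinR
        by_cases hP : sub i x y = "P"
        · have hstep : stepA i (n + 1) ((x, y, 2) :: rest) vis = true := by
            simp only [stepA]
            rw [if_pos ⟨by norm_num, hP⟩]
          rw [hstep, goalQ_cons]
          exact ⟨fun _ => Or.inl (Or.inl hP), fun _ => rfl⟩
        · have hstep : stepA i (n + 1) ((x, y, 2) :: rest) vis
              = stepA i n rest (setv vis x y) := by
            simp only [stepA]
            rw [if_neg (fun h => hP h.2), if_neg (by norm_num)]
          have hInv2 : InvQ i s rest (setv vis x y) := by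
            refine ⟨hshv, ?_, fun it hit => hI1 it (List.mem_cons_of_mem _ hit), ?_⟩
            · rw [getv_setv hsh hinR hs]
              split_ifs with h
              · rfl
              · exact hviss
            · intro p hpin hpv hpP
              rw [getv_setv hsh hinR hpin] at hpv
              split_ifs at hpv with hxy
              · exact absurd hpP (notP_of i hxy hP)
              · rcases hI2 p hpin hpv hpP with h2 | ⟨d, hd2⟩
                · exact Or.inl h2
                · rcases List.mem_cons.mp hd2 with h3 | h3
                  · exact absurd hpP (notP_of' i h3 hP)
                  · exact Or.inr ⟨d, h3⟩
          have hphi2 : phiQ rest < n := by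
            rw [phiQ_cons] at hphi
            have : wgt (x, y, (2 : Int)).2.2 = 1 := rfl
            omega
          rw [hstep, ih rest (setv vis x y) hInv2 hphi2, goalQ_cons]
          have : ¬(isP i ((x, y, (2:Int)).1, (x, y, (2:Int)).2.1) ∨
              ((x, y, (2:Int)).2.2 = 1 ∧ ∃ p ∈ nbrsL ((x, y, (2:Int)).1, (x, y, (2:Int)).2.1),
                inR p ∧ isP i p ∧ p ≠ s)) := by
            rintro (h | ⟨h, -⟩)
            · exact hP h
            · norm_num at h
          exact ⟨fun h => Or.inr h, fun h => h.elim (fun h1 => absurd h1 this) id⟩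

lemma N1_eq_push (i : List (List String)) (s : Int × Int) (hs : inR s) :
    pushL i (setv visInit s.1 s.2) s = N1 i s := by
  rw [pushL, N1]
  apply List.filter_congr
  intro p hp
  have hpne : p ≠ s := nbr_ne hp
  by_cases hpin : inR p
  · have hg := getv_setv shape_visInit hs hpin
    rw [if_neg (by intro h; exact hpne (Prod.ext_iff.mpr ⟨h.1, h.2⟩)), getv_visInit] at hg
    simp only [condP, hg]
    simp [hpin]
  · simp [condP, hpin]

lemma phiQ_map1 (L : List (Int × Int)) :
    phiQ (L.map fun p => (p.1, p.2, (1 : Int))) = 5 * L.length := by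
  simp only [phiQ, List.map_map]
  have h : List.map ((fun it : Int × Int × Int => wgt it.2.2) ∘ fun p : Int × Int => (p.1, p.2, (1 : Int))) L
      = List.map (fun _ => 5) L := List.map_congr_left (fun p _ => rfl)
  rw [h]
  simp [List.map_const', List.sum_replicate, mul_comm]

lemma foundIff (i : List (List String)) (s : Int × Int) (hs : inR s) :
    (stepA i 30 [(s.1, s.2, 0)] visInit = true ↔ ∃ t, Conf i s t) := by
  have hshv : Vshape (setv visInit s.1 s.2) := shape_setv shape_visInit hs
  have hstep : stepA i 30 [(s.1, s.2, 0)] visInit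
      = stepA i 29 ((N1 i s).map (fun p => (p.1, p.2, (1 : Int))))
          (markAll (setv visInit s.1 s.2) (N1 i s)) := by
    show stepA i (29 + 1) [(s.1, s.2, 0)] visInit = _
    simp only [stepA]
    rw [if_neg (by norm_num), if_pos (Or.inr trivial),
      expand_eq i s.1 s.2 0 [] (setv visInit s.1 s.2) hshv, N1_eq_push i s hs]
    norm_num
  have hN1in : ∀ p ∈ N1 i s, inR p := fun p hp => (mem_N1.mp hp).2.1
  have hInv1 : InvQ i s ((N1 i s).map fun p => (p.1, p.2, (1 : Int)))
      (markAll (setv visInit s.1 s.2) (N1 i s)) := by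
    refine ⟨shape_markAll hshv hN1in, ?_, ?_, ?_⟩
    · rw [getv_markAll hshv hN1in hs]
      right
      rw [getv_setv shape_visInit hs hs, if_pos ⟨rfl, rfl⟩]
    · intro it hit
      obtain ⟨p, hp, rfl⟩ := List.mem_map.mp hit
      exact Or.inl ⟨rfl, hp⟩
    · intro p hpin hpv hpP
      rw [getv_markAll hshv hN1in hpin] at hpv
      rcases hpv with h | h
      · exact Or.inr ⟨1, List.mem_map.mpr ⟨p, h, rfl⟩⟩
      · rw [getv_setv shape_visInit hs hpin] at h
        split_ifs at h with hps
        · exact Or.inl (Prod.ext_iff.mpr ⟨hps.1, hps.2⟩)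
        · rw [getv_visInit] at h
          exact absurd h (by simp)
  have hphi1 : phiQ ((N1 i s).map fun p => (p.1, p.2, (1 : Int))) < 29 := by
    have hlen : (N1 i s).length ≤ 4 := by
      have := List.length_filter_le (fun p => decide (inR p) && decide (openC i p)) (nbrsL s)
      simpa [N1, nbrsL] using this
    rw [phiQ_map1]
    omega
  rw [hstep, stepA_iff i s hs 29 _ _ hInv1 hphi1]
  constructor
  · rintro ⟨it, hit, hhit⟩
    obtain ⟨m, hm, rfl⟩ := List.mem_map.mp hit
    rcases hhit with h | ⟨-, p, hpn, hpin, hpP, hps⟩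
    · exact ⟨m, (mem_N1.mp hm).2.1, h, nbr_ne (mem_N1.mp hm).1, Or.inl hm⟩
    · exact ⟨p, hpin, hpP, hps, Or.inr ⟨m, hm, hpn⟩⟩
  · rintro ⟨t, htin, htP, htne, hc | ⟨m, hm, hmn⟩⟩
    · exact ⟨(t.1, t.2, 1), List.mem_map.mpr ⟨t, hc, rfl⟩, Or.inl htP⟩
    · exact ⟨(m.1, m.2, 1), List.mem_map.mpr ⟨m, hm, rfl⟩, Or.inr ⟨rfl, t, hmn, htin, htP, htne⟩⟩

lemma psB_closed (i : List (List String)) :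
    psB i = (PySem.List.pyRange 0 5 1).flatMap (fun a =>
      ((PySem.List.pyRange 0 5 1).filter (fun b => decide (sub i a b = "P"))).map
        (fun b => (a, b))) := by
  rw [psB, PySem.List.foldl_congr_mem _ _ (fun acc a =>
      acc ++ ((PySem.List.pyRange 0 5 1).filter (fun b => decide (sub i a b = "P"))).map
        (fun b => (a, b))) _
    (fun acc a _ => PySem.List.foldl_append_ite (fun b => sub i a b = "P") (fun b => (a, b)) _ acc),
    PySem.List.foldl_append_eq_flatMap]
  rfl

lemma ppoints_closed (i : List (List String)) :
    ppoints i = (PySem.List.pyRange 0 5 1).flatMap (fun a =>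
      ((PySem.List.pyRange 0 5 1).filter (fun b => decide (sub i a b = "P"))).map
        (fun b => (a, b, 0))) := by
  rw [ppoints, PySem.List.foldl_congr_mem _ _ (fun acc a =>
      acc ++ ((PySem.List.pyRange 0 5 1).filter (fun b => decide (sub i a b = "P"))).map
        (fun b => (a, b, 0))) _
    (fun acc a _ => PySem.List.foldl_append_ite (fun b => sub i a b = "P") (fun b => (a, b, 0)) _ acc),
    PySem.List.foldl_append_eq_flatMap]
  rfl

lemma ppoints_eq (i : List (List String)) :
    ppoints i = (psB i).map (fun p => (p.1, p.2, 0)) := by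
  rw [ppoints_closed, psB_closed, List.map_flatMap]
  simp only [List.map_map]
  rfl

lemma mem_psB {i : List (List String)} {p : Int × Int} :
    p ∈ psB i ↔ inR p ∧ isP i p := by
  rw [psB_closed]
  simp only [List.mem_flatMap, List.mem_map, List.mem_filter, PySem.List.mem_pyRange_one,
    decide_eq_true_eq]
  constructor
  · rintro ⟨a, ha, b, ⟨hb, hP⟩, rfl⟩
    exact ⟨⟨ha.1, ha.2, hb.1, hb.2⟩, hP⟩
  · rintro ⟨⟨h1, h2, h3, h4⟩, hP⟩
    exact ⟨p.1, ⟨h1, h2⟩, p.2, ⟨⟨h3, h4⟩, hP⟩, rfl⟩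

lemma pairsB_iff (i : List (List String)) :
    ∀ ps : List (Int × Int), (pairsB i ps = true ↔
      ∃ l₁ p l₂, ps = l₁ ++ p :: l₂ ∧ ∃ t ∈ l₂, nearB i p t = true) := by
  intro ps
  induction ps with
  | nil =>
    simp only [pairsB]
    constructor
    · intro h; cases h
    · rintro ⟨l₁, p, l₂, heq, -⟩
      exact absurd heq.symm (List.append_ne_nil_of_right_ne_nil _ (List.cons_ne_nil _ _))
  | cons p rest ih =>
    rw [show pairsB i (p :: rest) = (rest.any (fun t => nearB i p t) || pairsB i rest) from rfl]
    simp only [Bool.or_eq_true, List.any_eq_true, ih]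
    constructor
    · rintro (⟨t, ht, hn⟩ | ⟨l₁, q, l₂, rfl, t, ht, hn⟩)
      · exact ⟨[], p, rest, rfl, t, ht, hn⟩
      · exact ⟨p :: l₁, q, l₂, rfl, t, ht, hn⟩
    · rintro ⟨l₁, q, l₂, heq, t, ht, hn⟩
      cases l₁ with
      | nil =>
        simp only [List.nil_append, List.cons.injEq] at heq
        obtain ⟨rfl, rfl⟩ := heq
        exact Or.inl ⟨t, ht, hn⟩
      | cons a l₁' =>
        simp only [List.cons_append, List.cons.injEq] at heq
        obtain ⟨rfl, rfl⟩ := heq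
        exact Or.inr ⟨l₁', q, l₂, rfl, t, ht, hn⟩

lemma exists_split {α : Type} : ∀ {l : List α} {s t : α}, s ∈ l → t ∈ l → s ≠ t →
    ∃ l₁ p l₂, l = l₁ ++ p :: l₂ ∧ ((p = s ∧ t ∈ l₂) ∨ (p = t ∧ s ∈ l₂)) := by
  intro l
  induction l with
  | nil => intro s t hs _ _; cases hs
  | cons a rest ih =>
    intro s t hs ht hne
    rcases List.mem_cons.mp hs with rfl | hs'
    · rcases List.mem_cons.mp ht with h | ht'
      · exact absurd h.symm hne
      · exact ⟨[], s, rest, rfl, Or.inl ⟨rfl, ht'⟩⟩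
    · rcases List.mem_cons.mp ht with rfl | ht'
      · exact ⟨[], t, rest, rfl, Or.inr ⟨rfl, hs'⟩⟩
      · obtain ⟨l₁, p, l₂, rfl, hc⟩ := ih hs' ht' hne
        exact ⟨a :: l₁, p, l₂, rfl, hc⟩

lemma open_of_isP {i : List (List String)} {p : Int × Int} (h : isP i p) : openC i p := by
  intro hX
  rw [h] at hX
  exact P_ne_X hX

lemma confSymm {i : List (List String)} {s t : Int × Int} (hs1 : inR s) (hs2 : isP i s)
    (h : Conf i s t) : Conf i t s := by
  obtain ⟨htin, htP, htne, hc⟩ := h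
  refine ⟨hs1, hs2, Ne.symm htne, ?_⟩
  rcases hc with hmem | ⟨m, hm, htm⟩
  · have h1 := mem_N1.mp hmem
    exact Or.inl (mem_N1.mpr ⟨nbr_symm h1.1, hs1, open_of_isP hs2⟩)
  · have h1 := mem_N1.mp hm
    exact Or.inr ⟨m, mem_N1.mpr ⟨nbr_symm htm, h1.2.1, h1.2.2⟩, nbr_symm h1.1⟩

lemma nearConf {i : List (List String)} {s t : Int × Int} (hs1 : inR s) (hs2 : isP i s)
    (ht1 : inR t) (ht2 : isP i t) : (nearB i s t = true ↔ Conf i s t) := by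
  obtain ⟨x, y⟩ := s
  obtain ⟨u, v⟩ := t
  have hx0 : 0 ≤ x := hs1.1
  have hx5 : x < 5 := hs1.2.1
  have hy0 : 0 ≤ y := hs1.2.2.1
  have hy5 : y < 5 := hs1.2.2.2
  have hu0 : 0 ≤ u := ht1.1
  have hu5 : u < 5 := ht1.2.1
  have hv0 : 0 ≤ v := ht1.2.2.1
  have hv5 : v < 5 := ht1.2.2.2
  rw [nearB]
  simp only [Int.abs_eq_natAbs]
  by_cases hd1 : ((x - u).natAbs : Int) + ((y - v).natAbs : Int) = 1
  · rw [if_pos hd1]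
    simp only [true_iff]
    refine ⟨ht1, ht2, ?_, Or.inl (mem_N1.mpr ⟨?_, ht1, open_of_isP ht2⟩)⟩
    · intro h
      rw [Prod.mk.injEq] at h
      omega
    · simp only [nbrsL, List.mem_cons, List.not_mem_nil, or_false, Prod.mk.injEq]
      omega
  · rw [if_neg hd1]
    by_cases hd2 : ((x - u).natAbs : Int) + ((y - v).natAbs : Int) = 2
    · rw [if_pos hd2]
      by_cases hxu : x = u
      · rw [if_pos hxu]
        rw [PySem.Int.floordiv_eq_ediv_of_pos (by norm_num)]
        constructor
        · intro hX
          replace hX := of_decide_eq_true hX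
          refine ⟨ht1, ht2, ?_, Or.inr ⟨(x, (y + v) / 2), mem_N1.mpr ⟨?_, ?_, hX⟩, ?_⟩⟩
          · intro h
            rw [Prod.mk.injEq] at h
            omega
          · simp only [nbrsL, List.mem_cons, List.not_mem_nil, or_false, Prod.mk.injEq, true_and]
            omega
          · exact ⟨hx0, hx5, by omega, by omega⟩
          · simp only [nbrsL, List.mem_cons, List.not_mem_nil, or_false, Prod.mk.injEq]
            omega
        · rintro ⟨-, -, htne, hc | ⟨⟨m1, m2⟩, hm, htm⟩⟩
          · exfalso
            have := (mem_N1.mp hc).1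
            simp only [nbrsL, List.mem_cons, List.not_mem_nil, or_false, Prod.mk.injEq] at this
            omega
          · obtain ⟨hmn, hmin, hmo⟩ := mem_N1.mp hm
            simp only [nbrsL, List.mem_cons, List.not_mem_nil, or_false, Prod.mk.injEq] at hmn htm
            have hme : m1 = x ∧ m2 = (y + v) / 2 := by omega
            apply decide_eq_true
            rw [← hme.1, ← hme.2]
            exact hmo
      · rw [if_neg hxu]
        by_cases hyv : y = v
        · rw [if_pos hyv]
          rw [PySem.Int.floordiv_eq_ediv_of_pos (by norm_num)]
          constructor
          · intro hX
            replace hX := of_decide_eq_true hX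
            refine ⟨ht1, ht2, ?_, Or.inr ⟨((x + u) / 2, y), mem_N1.mpr ⟨?_, ?_, hX⟩, ?_⟩⟩
            · intro h
              rw [Prod.ext_iff] at h
              omega
            · simp only [nbrsL, List.mem_cons, List.not_mem_nil, or_false, Prod.mk.injEq, and_true]
              omega
            · exact ⟨by omega, by omega, hy0, hy5⟩
            · simp only [nbrsL, List.mem_cons, List.not_mem_nil, or_false, Prod.mk.injEq]
              omega
          · rintro ⟨-, -, htne, hc | ⟨⟨m1, m2⟩, hm, htm⟩⟩
            · exfalso
              have := (mem_N1.mp hc).1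
              simp only [nbrsL, List.mem_cons, List.not_mem_nil, or_false, Prod.mk.injEq] at this
              omega
            · obtain ⟨hmn, hmin, hmo⟩ := mem_N1.mp hm
              simp only [nbrsL, List.mem_cons, List.not_mem_nil, or_false, Prod.mk.injEq] at hmn htm
              have hme : m1 = (x + u) / 2 ∧ m2 = y := by omega
              apply decide_eq_true
              rw [← hme.1, ← hme.2]
              exact hmo
        · rw [if_neg hyv]
          constructor
          · intro hb
            simp only [Bool.or_eq_true, decide_eq_true_eq] at hb
            rcases hb with h | h
            · refine ⟨ht1, ht2, ?_, Or.inr ⟨(x, v), mem_N1.mpr ⟨?_, ?_, h⟩, ?_⟩⟩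
              · intro hcon
                rw [Prod.mk.injEq] at hcon
                omega
              · simp only [nbrsL, List.mem_cons, List.not_mem_nil, or_false, Prod.mk.injEq, true_and]
                omega
              · exact ⟨hx0, hx5, hv0, hv5⟩
              · simp only [nbrsL, List.mem_cons, List.not_mem_nil, or_false, Prod.mk.injEq, and_true]
                omega
            · refine ⟨ht1, ht2, ?_, Or.inr ⟨(u, y), mem_N1.mpr ⟨?_, ?_, h⟩, ?_⟩⟩
              · intro hcon
                rw [Prod.mk.injEq] at hcon
                omega
              · simp only [nbrsL, List.mem_cons, List.not_mem_nil, or_false, Prod.mk.injEq, and_true]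
                omega
              · exact ⟨hu0, hu5, hy0, hy5⟩
              · simp only [nbrsL, List.mem_cons, List.not_mem_nil, or_false, Prod.mk.injEq, true_and]
                omega
          · rintro ⟨-, -, htne, hc | ⟨⟨m1, m2⟩, hm, htm⟩⟩
            · exfalso
              have := (mem_N1.mp hc).1
              simp only [nbrsL, List.mem_cons, List.not_mem_nil, or_false, Prod.mk.injEq] at this
              omega
            · obtain ⟨hmn, hmin, hmo⟩ := mem_N1.mp hm
              simp only [nbrsL, List.mem_cons, List.not_mem_nil, or_false, Prod.mk.injEq] at hmn htm
              have hme : (m1 = x ∧ m2 = v) ∨ (m1 = u ∧ m2 = y) := by omega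
              rcases hme with ⟨he1, he2⟩ | ⟨he1, he2⟩
              · have hx : sub i x v ≠ "X" := by rw [← he1, ← he2]; exact hmo
                simp [hx]
              · have hx : sub i u y ≠ "X" := by rw [← he1, ← he2]; exact hmo
                simp [hx]
    · rw [if_neg hd2]
      constructor
      · intro h
        exact absurd h (by simp)
      · rintro ⟨-, -, htne, hc | ⟨⟨m1, m2⟩, hm, htm⟩⟩
        · exfalso
          have := (mem_N1.mp hc).1
          simp only [nbrsL, List.mem_cons, List.not_mem_nil, or_false, Prod.mk.injEq] at this
          omega
        · exfalso
          have hmn := (mem_N1.mp hm).1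
          simp only [nbrsL, List.mem_cons, List.not_mem_nil, or_false, Prod.mk.injEq] at hmn htm
          have htne' : ¬(u = x ∧ v = y) := by
            intro hcon
            exact htne (by rw [hcon.1, hcon.2])
          omega

lemma main_iff (i : List (List String)) :
    ((ppoints i).any (fun c => stepA i 30 [c] visInit) = true) ↔ (pairsB i (psB i) = true) := by
  rw [ppoints_eq, List.any_map, List.any_eq_true]
  constructor
  · rintro ⟨p, hp, hstep⟩
    obtain ⟨hpin, hpP⟩ := mem_psB.mp hp
    obtain ⟨t, hConf⟩ := (foundIff i p hpin).mp hstep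
    have htmem : t ∈ psB i := mem_psB.mpr ⟨hConf.1, hConf.2.1⟩
    obtain ⟨l₁, q, l₂, heq, hor⟩ := exists_split hp htmem (Ne.symm hConf.2.2.1)
    apply (pairsB_iff i (psB i)).mpr
    rcases hor with ⟨hqp, htl⟩ | ⟨hqt, hsl⟩
    · subst hqp
      exact ⟨l₁, q, l₂, heq, t, htl, (nearConf hpin hpP hConf.1 hConf.2.1).mpr hConf⟩
    · subst hqt
      exact ⟨l₁, q, l₂, heq, p, hsl,
        (nearConf hConf.1 hConf.2.1 hpin hpP).mpr (confSymm hpin hpP hConf)⟩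
  · intro hpairs
    obtain ⟨l₁, q, l₂, heq, t, htl, hnear⟩ := (pairsB_iff i (psB i)).mp hpairs
    have hq : q ∈ psB i := by rw [heq]; exact List.mem_append.mpr (Or.inr List.mem_cons_self)
    have ht : t ∈ psB i := by
      rw [heq]; exact List.mem_append.mpr (Or.inr (List.mem_cons_of_mem _ htl))
    obtain ⟨hqin, hqP⟩ := mem_psB.mp hq
    obtain ⟨htin, htP⟩ := mem_psB.mp ht
    have hConf := (nearConf hqin hqP htin htP).mp hnear
    exact ⟨q, hq, (foundIff i q hqin).mpr ⟨t, hConf⟩⟩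

theorem bfs_spec : Claim_equal_bfs := by
  intro i _ _
  unfold Spec_bfs
  by_cases hb : pairsB i (psB i) = true
  · rw [bfs, bfs_alt, if_pos ((main_iff i).mpr hb), if_pos hb]
  · have hA : ¬((ppoints i).any (fun c => stepA i 30 [c] visInit) = true) :=
      fun ha => hb ((main_iff i).mp ha)
    rw [bfs, bfs_alt, if_neg hA, if_neg hb]
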